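-- pv_equiv track=rewrite | github.com/Tunde-ssbb/ML4QS-group60 | src/machine_learning/util.py | get_validation
-- ===== SOURCE A (Python) =====
-- def get_validation(train_chunks):
--     valid_chunks = []
--     new_training = []
--     total_duration = 0
--     test_duration = 5000
--     for chunk in train_chunks:
--         if total_duration < test_duration:
--             valid_chunks.append(chunk)
--             total_duration += len(chunk)
--         else:
--             new_training.append(chunk)
--     return valid_chunks, new_training
-- ===== SOURCE B (Python) =====
-- def get_validation(train_chunks):
--     total = 0
--     split = 0
--     for chunk in train_chunks:
--         if total >= 5000:
--             break
--         total += len(chunk)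
--         split += 1
--     return train_chunks[:split], train_chunks[split:]
-- ===== Notes on version B (the rewrite author's own statement) =====
-- stated objective: simpler
-- what changed: B finds the split index with an early-exit boundary search and builds both outputs by two slices, instead of A's per-element branch dispatch appending into two accumulator lists.
import Mathlib
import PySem

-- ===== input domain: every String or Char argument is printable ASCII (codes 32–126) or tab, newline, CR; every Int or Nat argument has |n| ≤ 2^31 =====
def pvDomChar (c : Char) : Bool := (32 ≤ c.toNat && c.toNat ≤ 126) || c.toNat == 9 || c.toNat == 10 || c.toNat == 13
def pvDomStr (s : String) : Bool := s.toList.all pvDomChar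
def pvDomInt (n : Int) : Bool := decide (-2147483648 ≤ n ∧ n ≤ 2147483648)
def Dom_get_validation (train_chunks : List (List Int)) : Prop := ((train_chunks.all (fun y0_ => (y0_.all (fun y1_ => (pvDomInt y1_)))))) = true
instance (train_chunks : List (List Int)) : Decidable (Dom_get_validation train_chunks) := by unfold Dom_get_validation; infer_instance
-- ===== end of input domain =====

-- B replaces A's per-element two-accumulator branch dispatch by an early-exit split-index
-- search followed by two slices (objective: simpler).

-- ===== PORT A =====
def get_validation (train_chunks : List (List Int)) : List (List Int) × List (List Int) :=
  let s := train_chunks.foldl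
    (fun (st : List (List Int) × List (List Int) × Int) chunk =>
      if st.2.2 < 5000 then (st.1 ++ [chunk], st.2.1, st.2.2 + (chunk.length : Int))
      else (st.1, st.2.1 ++ [chunk], st.2.2))
    ([], [], 0)
  (s.1, s.2.1)

-- ===== PORT B =====
-- the loop with break: counts chunks until the running total reaches 5000
def gvSplitIdx (l : List (List Int)) (total : Int) : Nat :=
  match l with
  | [] => 0
  | c :: rest => if 5000 ≤ total then 0 else gvSplitIdx rest (total + (c.length : Int)) + 1

-- train_chunks[:split], train_chunks[split:] with 0 ≤ split ≤ len: exactly take/drop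
def get_validation_alt (train_chunks : List (List Int)) : List (List Int) × List (List Int) :=
  let k := gvSplitIdx train_chunks 0
  (train_chunks.take k, train_chunks.drop k)

-- ===== PRECONDITION & SPEC =====
def Spec_get_validation (train_chunks : List (List Int)) (out : List (List Int) × List (List Int)) : Prop := out = get_validation_alt train_chunks
instance (train_chunks : List (List Int)) (out : List (List Int) × List (List Int)) : Decidable (Spec_get_validation train_chunks out) := by unfold Spec_get_validation; infer_instance

-- ===== CLAIM (what is proved, stated in full; the proofs are below) =====
def Claim_equal_get_validation : Prop := ∀ (train_chunks : List (List Int)), Dom_get_validation train_chunks → Spec_get_validation train_chunks (get_validation train_chunks)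

-- ===== LEMMAS AND PROOFS =====
theorem gvSplitIdx_of_ge (l : List (List Int)) (t : Int) (h : 5000 ≤ t) :
    gvSplitIdx l t = 0 := by
  cases l with
  | nil => rfl
  | cons c rest => simp [gvSplitIdx, h]

theorem gv_fold_eq (l : List (List Int)) (v n : List (List Int)) (t : Int) :
    ((l.foldl
      (fun (st : List (List Int) × List (List Int) × Int) chunk =>
        if st.2.2 < 5000 then (st.1 ++ [chunk], st.2.1, st.2.2 + (chunk.length : Int))
        else (st.1, st.2.1 ++ [chunk], st.2.2))
      (v, n, t)).1,
     (l.foldl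
      (fun (st : List (List Int) × List (List Int) × Int) chunk =>
        if st.2.2 < 5000 then (st.1 ++ [chunk], st.2.1, st.2.2 + (chunk.length : Int))
        else (st.1, st.2.1 ++ [chunk], st.2.2))
      (v, n, t)).2.1)
    = (v ++ l.take (gvSplitIdx l t), n ++ l.drop (gvSplitIdx l t)) := by
  induction l generalizing v n t with
  | nil => simp [gvSplitIdx]
  | cons c rest ih =>
    by_cases h : t < 5000
    · have h' : ¬ (5000 ≤ t) := by omega
      simp only [List.foldl_cons, if_pos h, gvSplitIdx, if_neg h']
      rw [ih]
      simp
    · have h' : (5000 : Int) ≤ t := by omega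
      simp only [List.foldl_cons, if_neg h, gvSplitIdx, if_pos h']
      rw [ih, gvSplitIdx_of_ge rest t h']
      simp

-- ===== VERDICT (by name: the statement is the Claim_ definition above) =====
theorem get_validation_spec : Claim_equal_get_validation := by
  intro l _
  unfold Spec_get_validation get_validation get_validation_alt
  have := gv_fold_eq l [] [] 0
  simp only [List.nil_append] at this
  exact Prod.ext (congrArg Prod.fst this) (congrArg Prod.snd this)
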